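-- pv_equiv track=rewrite | github.com/Szyszek25/JakubSzych | SCENARIUSZE_JUTRA/knowledge_representation.py | _extract_timeframe
-- ===== SOURCE A (Python) =====
-- def _extract_timeframe(content: str) -> str:
--     """Ekstraktuje horyzont czasowy z treści"""
--     if any(word in content for word in ['immediate', 'now', 'current', 'today']):
--         return 'immediate'
--     elif any(word in content for word in ['short', 'weeks', 'months', 'recent']):
--         return 'short_term'
--     elif any(word in content for word in ['medium', 'year', 'years']):
--         return 'medium_term'
--     elif any(word in content for word in ['long', 'future', 'decade']):
--         return 'long_term'
--     return 'medium_term'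
-- ===== SOURCE B (Python) =====
-- _KEYWORD_PRIORITY = {
--     'immediate': 0, 'now': 0, 'current': 0, 'today': 0,
--     'short': 1, 'weeks': 1, 'months': 1, 'recent': 1,
--     'medium': 2, 'year': 2, 'years': 2,
--     'long': 3, 'future': 3, 'decade': 3,
-- }
-- _LABELS = ['immediate', 'short_term', 'medium_term', 'long_term']
--
-- def _extract_timeframe(content: str) -> str:
--     best = 4
--     for word, prio in _KEYWORD_PRIORITY.items():
--         if prio < best and word in content:
--             best = prio
--     return _LABELS[best] if best < 4 else 'medium_term'
-- ===== Notes on version B (the rewrite author's own statement) =====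
-- stated objective: alternative
-- what changed: Replaced the ordered first-match if/elif chain by a single flat pass over a keyword-to-priority map that aggregates the minimum priority of any keyword present, then indexes a label array (default when no keyword matches).
import Mathlib
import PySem

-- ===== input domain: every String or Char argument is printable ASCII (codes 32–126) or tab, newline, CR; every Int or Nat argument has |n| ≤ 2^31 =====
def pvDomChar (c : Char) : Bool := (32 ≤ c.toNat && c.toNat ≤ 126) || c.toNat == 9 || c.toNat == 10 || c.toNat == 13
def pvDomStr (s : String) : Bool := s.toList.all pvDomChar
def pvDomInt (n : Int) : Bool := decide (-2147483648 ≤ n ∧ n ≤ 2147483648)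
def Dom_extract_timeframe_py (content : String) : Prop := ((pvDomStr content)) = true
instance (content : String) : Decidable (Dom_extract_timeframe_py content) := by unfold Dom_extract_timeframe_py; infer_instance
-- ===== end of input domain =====

-- B replaces the ordered if/elif chain by one flat min-priority pass over a keyword→priority map; alternative decomposition, same behaviour.

-- ===== PORT A =====
-- literal transliteration of A's if/elif keyword chain
def extract_timeframe_py (content : String) : String :=
  if ["immediate", "now", "current", "today"].any (fun w => PySem.Str.isIn w content) then
    "immediate"
  else if ["short", "weeks", "months", "recent"].any (fun w => PySem.Str.isIn w content) then
    "short_term"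
  else if ["medium", "year", "years"].any (fun w => PySem.Str.isIn w content) then
    "medium_term"
  else if ["long", "future", "decade"].any (fun w => PySem.Str.isIn w content) then
    "long_term"
  else
    "medium_term"

-- ===== PORT B =====
-- B: one flat pass aggregating the minimum priority among keywords present, then an index into the label array
def keywordPriority : List (String × Nat) :=
  [("immediate", 0), ("now", 0), ("current", 0), ("today", 0),
   ("short", 1), ("weeks", 1), ("months", 1), ("recent", 1),
   ("medium", 2), ("year", 2), ("years", 2),
   ("long", 3), ("future", 3), ("decade", 3)]

def timeframeLabels : List String := ["immediate", "short_term", "medium_term", "long_term"]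

-- the loop body: keep the smaller priority when the keyword occurs in the content
def tfStep (content : String) (best : Nat) (wp : String × Nat) : Nat :=
  if wp.2 < best ∧ PySem.Str.isIn wp.1 content then wp.2 else best

def extract_timeframe_py_alt (content : String) : String :=
  let best := keywordPriority.foldl (tfStep content) 4
  if best < 4 then timeframeLabels.getD best "medium_term" else "medium_term"

-- ===== PRECONDITION & SPEC =====
def Spec_extract_timeframe_py (content : String) (out : String) : Prop := out = extract_timeframe_py_alt content
instance (content : String) (out : String) : Decidable (Spec_extract_timeframe_py content out) := by unfold Spec_extract_timeframe_py; infer_instance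

-- ===== CLAIM (what is proved, stated in full; the proofs are below) =====
def Claim_equal_extract_timeframe_py : Prop := ∀ (content : String), Dom_extract_timeframe_py content → Spec_extract_timeframe_py content (extract_timeframe_py content)

-- ===== LEMMAS AND PROOFS =====

-- folding one constant-priority group: the minimum drops to p iff p beats the running best and some word of the group occurs
theorem tf_foldGroup (c : String) (p b : Nat) (ws : List String) :
    (ws.map (fun w => (w, p))).foldl (tfStep c) b
      = if p < b ∧ (ws.any (fun w => PySem.Str.isIn w c)) = true then p else b := by
  induction ws generalizing b with
  | nil => simp
  | cons w ws ih =>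
    simp only [List.map_cons, List.foldl_cons, tfStep, List.any_cons, Bool.or_eq_true]
    cases hw : PySem.Str.isIn w c <;> by_cases hp : p < b <;>
      simp [hw, hp, ih]

theorem keywordPriority_groups :
    keywordPriority =
      (["immediate", "now", "current", "today"].map (fun w => (w, 0)))
        ++ (["short", "weeks", "months", "recent"].map (fun w => (w, 1)))
        ++ (["medium", "year", "years"].map (fun w => (w, 2)))
        ++ (["long", "future", "decade"].map (fun w => (w, 3))) := rfl

-- ===== VERDICT (by name: the statement is the Claim_ definition above) =====
theorem extract_timeframe_py_spec : Claim_equal_extract_timeframe_py := by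
  intro content _
  unfold Spec_extract_timeframe_py extract_timeframe_py extract_timeframe_py_alt
  rw [keywordPriority_groups, List.foldl_append, List.foldl_append, List.foldl_append,
    tf_foldGroup, tf_foldGroup, tf_foldGroup, tf_foldGroup]
  cases hA : (["immediate", "now", "current", "today"].any
      (fun w => PySem.Str.isIn w content)) <;>
  cases hB : (["short", "weeks", "months", "recent"].any
      (fun w => PySem.Str.isIn w content)) <;>
  cases hC : (["medium", "year", "years"].any
      (fun w => PySem.Str.isIn w content)) <;>
  cases hD : (["long", "future", "decade"].any
      (fun w => PySem.Str.isIn w content)) <;>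
    simp [timeframeLabels]
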